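-- pv_equiv track=rewrite | github.com/gomeznico/EulerProblems | problem97/problem97.py | last_x_digits_2_exp_n
-- ===== SOURCE A (Python) =====
-- def last_x_digits_2_exp_n(x,n):
--     num = 1
--     num_digits = x+1
--     for i in range(1,n+1):
--         num *= 2
--         if len(str(num)) > num_digits:
--             num = str(num)[-num_digits:]
--             num = int(num)
--
--     return num
-- ===== SOURCE B (Python) =====
-- def last_x_digits_2_exp_n(x, n):
--     # 2**n has at most n digits, so a modulus of more than n digits is never needed
--     return pow(2, n, 10 ** min(x + 1, n)) if n > 0 else 1
-- ===== Notes on version B (the rewrite author's own statement) =====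
-- stated objective: faster
-- what changed: Replaces the n-step doubling loop with per-step string slicing by a single modular exponentiation pow(2, n, 10**min(x+1, n)) (the result never has more than n digits, so the modulus is capped).
-- intended difference: For x = -1 and n >= 1 A's zero-width slice str(num)[-0:] never truncates, so A returns the full 2**n; B returns pow(2, n, 1) = 0, the intended 'last zero digits' value. — e.g. on last_x_digits_2_exp_n(-1, 1): A returns 2, B returns 0
import Mathlib
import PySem

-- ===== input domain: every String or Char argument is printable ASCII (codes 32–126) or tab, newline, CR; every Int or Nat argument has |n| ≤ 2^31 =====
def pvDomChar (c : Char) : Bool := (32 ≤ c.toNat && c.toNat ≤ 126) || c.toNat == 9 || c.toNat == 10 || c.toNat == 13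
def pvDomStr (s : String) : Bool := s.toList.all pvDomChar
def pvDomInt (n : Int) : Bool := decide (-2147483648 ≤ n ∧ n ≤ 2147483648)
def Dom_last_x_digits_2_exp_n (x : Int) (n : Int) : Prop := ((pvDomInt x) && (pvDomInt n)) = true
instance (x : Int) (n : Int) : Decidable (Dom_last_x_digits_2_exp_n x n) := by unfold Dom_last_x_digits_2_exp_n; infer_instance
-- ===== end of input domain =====

-- B replaces A's n-step doubling-and-truncating loop by one modular exponentiation (objective: faster).

-- ===== PORT A =====
-- Python `int(s)`: ported by hand (below) because within Pre_ this program only ever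
-- feeds `int` nonempty ASCII-digit strings (slices of str(num) with num > 0), where
-- this digit fold is exact; on other strings it returns none (int would raise ValueError,
-- those inputs are outside Pre_).
def pvVal (cs : List Char) : Nat := cs.foldl (fun a c => a * 10 + (c.toNat - 48)) 0

def pvIntList? (cs : List Char) : Option Int :=
  if cs ≠ [] ∧ cs.all Char.isDigit then some ((pvVal cs : Nat) : Int) else none

def pvInt? (s : String) : Option Int := pvIntList? s.toList

-- the body of A's `for` loop (num_digits = x+1 is loop-invariant in the Python)
def pvStepA (num_digits : Int) (num : Int) : Int :=
  let num2 := num * 2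
  if PySem.Str.len (PySem.Int.toStr num2) > num_digits then
    (pvInt? (PySem.Str.slice (PySem.Int.toStr num2) (some (-num_digits)) none)).getD 0
  else num2

def last_x_digits_2_exp_n (x : Int) (n : Int) : Int :=
  (PySem.List.pyRange 1 (n + 1)).foldl (fun num _i => pvStepA (x + 1) num) 1

-- ===== PORT B =====
-- pow(2, n, m) is PySem.Int.powMod; 10**min(x+1, n) ported as 10^(min (x+1) n).toNat,
-- exact for x ≥ -1 (all of Pre_ with n > 0, where min (x+1) n ≥ 0).
def last_x_digits_2_exp_n_alt (x : Int) (n : Int) : Int :=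
  if 0 < n then PySem.Int.powMod 2 n.toNat ((10 : Int) ^ (min (x + 1) n).toNat) else 1

-- ===== PRECONDITION & SPEC =====
-- Pre_ excludes exactly x ≤ -2 with n ≥ 1, where A raises ValueError (int('') on the
-- empty slice str(2)[-num_digits:] with num_digits ≤ -1).
def Pre_last_x_digits_2_exp_n (x : Int) (n : Int) : Prop := 1 ≤ n → -1 ≤ x
instance (x : Int) (n : Int) : Decidable (Pre_last_x_digits_2_exp_n x n) := by unfold Pre_last_x_digits_2_exp_n; infer_instance
def pvWitness_last_x_digits_2_exp_n : Int × Int := (3, 12)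

-- For x = -1 and n ≥ 1 A's zero-width slice str(num)[-0:] never truncates, so A returns
-- the full 2**n; B returns pow(2, n, 1) = 0, the intended 'last zero digits' value.
def D_last_x_digits_2_exp_n (x : Int) (n : Int) : Prop := x = -1 ∧ 1 ≤ n
instance (x : Int) (n : Int) : Decidable (D_last_x_digits_2_exp_n x n) := by unfold D_last_x_digits_2_exp_n; infer_instance

def Spec_last_x_digits_2_exp_n (x : Int) (n : Int) (out : Int) : Prop := ¬ D_last_x_digits_2_exp_n x n → out = last_x_digits_2_exp_n_alt x n
instance (x : Int) (n : Int) (out : Int) : Decidable (Spec_last_x_digits_2_exp_n x n out) := by unfold Spec_last_x_digits_2_exp_n; infer_instance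

def pvDiffWitness_last_x_digits_2_exp_n : Int × Int := (-1, 1)
def pvDiffWitnessOut_last_x_digits_2_exp_n : Int × Int := (2, 0)

-- ===== CLAIM (what is proved, stated in full; the proofs are below) =====
def Claim_unchanged_last_x_digits_2_exp_n : Prop := ∀ (x : Int) (n : Int), Dom_last_x_digits_2_exp_n x n → Pre_last_x_digits_2_exp_n x n → Spec_last_x_digits_2_exp_n x n (last_x_digits_2_exp_n x n)
def Claim_changed_last_x_digits_2_exp_n : Prop := Dom_last_x_digits_2_exp_n (pvDiffWitness_last_x_digits_2_exp_n.1) (pvDiffWitness_last_x_digits_2_exp_n.2) ∧ Pre_last_x_digits_2_exp_n (pvDiffWitness_last_x_digits_2_exp_n.1) (pvDiffWitness_last_x_digits_2_exp_n.2) ∧ D_last_x_digits_2_exp_n (pvDiffWitness_last_x_digits_2_exp_n.1) (pvDiffWitness_last_x_digits_2_exp_n.2) ∧ last_x_digits_2_exp_n (pvDiffWitness_last_x_digits_2_exp_n.1) (pvDiffWitness_last_x_digits_2_exp_n.2) = pvDiffWitnessOut_last_x_digits_2_exp_n.1 ∧ last_x_digits_2_exp_n_alt (pvDiffWitness_last_x_digits_2_exp_n.1)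 (pvDiffWitness_last_x_digits_2_exp_n.2) = pvDiffWitnessOut_last_x_digits_2_exp_n.2 ∧ pvDiffWitnessOut_last_x_digits_2_exp_n.1 ≠ pvDiffWitnessOut_last_x_digits_2_exp_n.2
def Claim_exact_last_x_digits_2_exp_n : Prop := ∀ (x : Int) (n : Int), Dom_last_x_digits_2_exp_n x n → Pre_last_x_digits_2_exp_n x n → D_last_x_digits_2_exp_n x n → last_x_digits_2_exp_n x n ≠ last_x_digits_2_exp_n_alt x n

-- ===== LEMMAS AND PROOFS =====

theorem pv_toDigitsCore_eq (fuel : ℕ) : ∀ (n : ℕ) (l : List Char), 0 < n → n < fuel →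
    Nat.toDigitsCore 10 fuel n l = ((Nat.digits 10 n).map Nat.digitChar).reverse ++ l := by
  induction fuel with
  | zero => intro n l h1 h2; omega
  | succ f ih =>
    intro n l h1 h2
    rw [Nat.digits_def' (by norm_num : (1:ℕ) < 10) h1]
    simp only [Nat.toDigitsCore]
    by_cases h10 : n / 10 = 0
    · simp [h10]
    · rw [if_neg h10, ih (n / 10) _ (Nat.pos_of_ne_zero h10) (by omega)]
      simp

theorem pv_toDigits_eq (n : ℕ) (h : 0 < n) :
    Nat.toDigits 10 n = ((Nat.digits 10 n).map Nat.digitChar).reverse := by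
  have := pv_toDigitsCore_eq (n + 1) n [] h (by omega)
  simpa [Nat.toDigits] using this

theorem pv_digitChar_isDigit (d : ℕ) (h : d < 10) : (Nat.digitChar d).isDigit = true := by
  interval_cases d <;> decide

theorem pv_digitChar_toNat (d : ℕ) (h : d < 10) : (Nat.digitChar d).toNat - 48 = d := by
  interval_cases d <;> decide

theorem pvVal_rev_map (ds : List ℕ) (h : ∀ d ∈ ds, d < 10) :
    pvVal ((ds.map Nat.digitChar).reverse) = Nat.ofDigits 10 ds := by
  unfold pvVal
  rw [List.foldl_reverse]
  induction ds with
  | nil => simp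
  | cons d t ih =>
    simp only [List.map_cons, List.foldr_cons, Nat.ofDigits_cons]
    rw [ih (fun x hx => h x (List.mem_cons_of_mem d hx))]
    rw [pv_digitChar_toNat d (h d List.mem_cons_self)]
    ring

theorem pvIntList?_digits (M i : ℕ) (hM : 0 < M) (hi : i < (Nat.digits 10 M).length) :
    pvIntList? ((Nat.toDigits 10 M).drop i)
      = some ((M % 10 ^ ((Nat.digits 10 M).length - i) : ℕ) : Int) := by
  have hlt : ∀ d ∈ Nat.digits 10 M, d < 10 := fun d hd => Nat.digits_lt_base (by norm_num) hd
  rw [pv_toDigits_eq M hM, List.drop_reverse, List.length_map, ← List.map_take]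
  have htake : ∀ d ∈ (Nat.digits 10 M).take ((Nat.digits 10 M).length - i), d < 10 :=
    fun d hd => hlt d (List.mem_of_mem_take hd)
  unfold pvIntList?
  rw [if_pos]
  · rw [pvVal_rev_map _ htake,
        ← Nat.self_mod_pow_eq_ofDigits_take ((Nat.digits 10 M).length - i) M (by norm_num)]
  · constructor
    · simp only [ne_eq, List.reverse_eq_nil_iff, List.map_eq_nil_iff, List.take_eq_nil_iff]
      intro hcon
      rcases hcon with h1 | h1
      · omega
      · rw [h1] at hi; simp at hi
    · rw [List.all_eq_true]
      intro c hc
      rw [List.mem_reverse, List.mem_map] at hc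
      obtain ⟨d, hd, rfl⟩ := hc
      exact pv_digitChar_isDigit d (htake d hd)

theorem pv_len_toStr (z : Int) (hz : 0 < z) :
    PySem.Str.len (PySem.Int.toStr z) = ((Nat.digits 10 z.toNat).length : Int) := by
  rw [PySem.Str.len_eq, PySem.Int.toList_toStr]
  unfold PySem.Int.toChars
  rw [if_neg (by omega), pv_toDigits_eq z.toNat (by omega)]
  simp

theorem pv_stepA_mod (k : ℕ) (hk : 1 ≤ k) (v : Int) (hv : 1 ≤ v) (hvm : v < 10 ^ k) :
    pvStepA (k : Int) v = (v * 2) % (10 : Int) ^ k := by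
  have h2 : (0:Int) < v * 2 := by omega
  have hMc : (((v * 2).toNat : ℕ) : Int) = v * 2 := Int.toNat_of_nonneg (by omega)
  set M := (v * 2).toNat with hMdef
  have hM : 0 < M := by omega
  have hlen := pv_len_toStr (v * 2) h2
  unfold pvStepA
  simp only []
  by_cases hcond : 10 ^ k ≤ M
  · -- truncation fires: str(num) has k+1 digits, the slice drops the leading one
    have hup : M < 10 ^ (k + 1) := by
      have h1 : v * 2 < (10:Int) ^ k * 2 := by omega
      have hvv : v * 2 < (10:Int) ^ (k+1) := by
        have hp : (0:Int) < 10 ^ k := by positivity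
        calc v * 2 < 10 ^ k * 2 := h1
          _ ≤ (10:Int) ^ k * 10 := by nlinarith
          _ = (10:Int) ^ (k+1) := by ring
      have hcast : ((10:ℕ) ^ (k+1) : Int) = (10:Int) ^ (k+1) := by push_cast; ring
      omega
    have hL : (Nat.digits 10 M).length = k + 1 := by
      have hle := (Nat.digits_length_le_iff (by norm_num) M).mpr hup
      have hgt := (Nat.lt_digits_length_iff (by norm_num) M).mpr hcond
      omega
    rw [if_pos (by rw [hlen, hL]; exact_mod_cast by omega)]
    unfold pvInt?
    rw [PySem.Str.toList_slice, PySem.Chars.slice_eq_listSlice, PySem.Int.toList_toStr]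
    have htc : PySem.Int.toChars (v * 2) = Nat.toDigits 10 M := by
      unfold PySem.Int.toChars; rw [if_neg (by omega)]
    rw [htc]
    have hlen2 : (Nat.toDigits 10 M).length = k + 1 := by
      rw [pv_toDigits_eq M hM]; simp [hL]
    rw [PySem.List.slice_from_neg_natCast _ k hk, hlen2]
    have h1 : k + 1 - k = 1 := by omega
    rw [h1, pvIntList?_digits M 1 hM (by omega), hL]
    simp only [Option.getD_some]
    have h2' : k + 1 - 1 = k := by omega
    rw [h2']
    push_cast [hMc]
    rfl
  · -- no truncation: v*2 still fits in k digits
    have hMk : M < 10 ^ k := by omega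
    have hle : (Nat.digits 10 M).length ≤ k :=
      (Nat.digits_length_le_iff (by norm_num) M).mpr hMk
    rw [if_neg]
    · rw [Int.emod_eq_of_lt (by omega)]
      have hcast : ((10:ℕ) ^ k : Int) = (10:Int) ^ k := by push_cast; ring
      omega
    · rw [hlen]
      exact not_lt.mpr (by exact_mod_cast hle)

theorem pv_stepA_zero (v : Int) (hv : 1 ≤ v) : pvStepA 0 v = v * 2 := by
  have h2 : (0:Int) < v * 2 := by omega
  have hMc : (((v * 2).toNat : ℕ) : Int) = v * 2 := Int.toNat_of_nonneg (by omega)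
  set M := (v * 2).toNat with hMdef
  have hM : 0 < M := by omega
  have hL : 0 < (Nat.digits 10 M).length :=
    (Nat.lt_digits_length_iff (by norm_num) M).mpr (by omega)
  unfold pvStepA
  simp only []
  rw [if_pos (by rw [pv_len_toStr (v*2) h2]; exact_mod_cast hL)]
  unfold pvInt?
  rw [PySem.Str.toList_slice, PySem.Chars.slice_eq_listSlice, PySem.Int.toList_toStr]
  have htc : PySem.Int.toChars (v * 2) = Nat.toDigits 10 M := by
    unfold PySem.Int.toChars; rw [if_neg (by omega)]
  rw [htc, neg_zero, PySem.List.slice_zero_start, PySem.List.slice_none_none]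
  have hd := pvIntList?_digits M 0 hM hL
  rw [List.drop_zero] at hd
  rw [hd]
  simp only [Option.getD_some, Nat.sub_zero]
  have hMlt : M < 10 ^ (Nat.digits 10 M).length :=
    (Nat.digits_length_le_iff (by norm_num) M).mp le_rfl
  rw [Nat.mod_eq_of_lt hMlt, hMc]

theorem pv_state_pos (k : ℕ) (hk : 1 ≤ k) (j : ℕ) :
    1 ≤ (2:Int) ^ j % 10 ^ k ∧ (2:Int) ^ j % 10 ^ k < 10 ^ k := by
  have hm : (0:Int) < 10 ^ k := by positivity
  refine ⟨?_, Int.emod_lt_of_pos _ hm⟩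
  have h0 : 0 ≤ (2:Int) ^ j % 10 ^ k := Int.emod_nonneg _ (by positivity)
  rcases eq_or_lt_of_le h0 with h | h
  · exfalso
    have hdvd : (10:Int) ^ k ∣ 2 ^ j := Int.dvd_of_emod_eq_zero h.symm
    have h5 : (5:Int) ∣ 10 ^ k := by
      have h10 : (5:Int) ∣ 10 := by norm_num
      exact h10.trans (dvd_pow_self 10 (by omega))
    have h52 : (5:Int) ∣ 2 := (by norm_num : Prime (5:Int)).dvd_of_dvd_pow (h5.trans hdvd)
    norm_num at h52
  · omega

theorem pv_loopA (k : ℕ) (hk : 1 ≤ k) : ∀ j : ℕ,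
    (PySem.List.pyRange 1 ((j : Int) + 1)).foldl (fun num _i => pvStepA (k : Int) num) 1
      = (2 : Int) ^ j % 10 ^ k := by
  intro j
  induction j with
  | zero =>
    norm_num [PySem.List.pyRange_one_eq_nil (le_refl (1:Int))]
    rw [Int.emod_eq_of_lt (by norm_num) (by exact_mod_cast Nat.one_lt_pow (by omega) (by norm_num))]
  | succ j ih =>
    have hcast : ((j + 1 : ℕ) : Int) + 1 = ((j : Int) + 1) + 1 := by push_cast; ring
    rw [hcast, PySem.List.pyRange_one_succ_right (by omega), List.foldl_append, ih]
    simp only [List.foldl_cons, List.foldl_nil]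
    obtain ⟨h1, h2⟩ := pv_state_pos k hk j
    rw [pv_stepA_mod k hk _ h1 h2, pow_succ]
    rw [Int.mul_emod, Int.emod_emod_of_dvd _ dvd_rfl, ← Int.mul_emod]

theorem pv_loopNeg : ∀ j : ℕ,
    (PySem.List.pyRange 1 ((j : Int) + 1)).foldl (fun num _i => pvStepA 0 num) 1
      = (2 : Int) ^ j := by
  intro j
  induction j with
  | zero => norm_num [PySem.List.pyRange_one_eq_nil (le_refl (1:Int))]
  | succ j ih =>
    have hcast : ((j + 1 : ℕ) : Int) + 1 = ((j : Int) + 1) + 1 := by push_cast; ring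
    rw [hcast, PySem.List.pyRange_one_succ_right (by omega), List.foldl_append, ih]
    simp only [List.foldl_cons, List.foldl_nil]
    rw [pv_stepA_zero _ (one_le_pow₀ (by norm_num))]
    ring

-- ===== VERDICT (by name: the statement is the Claim_ definition above) =====
theorem last_x_digits_2_exp_n_spec : Claim_unchanged_last_x_digits_2_exp_n := by
  intro x n hdom hpre
  unfold Spec_last_x_digits_2_exp_n
  intro hnd
  unfold last_x_digits_2_exp_n last_x_digits_2_exp_n_alt
  by_cases hn : 1 ≤ n
  · have hx : -1 ≤ x := hpre hn
    have hx0 : 0 ≤ x := by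
      unfold D_last_x_digits_2_exp_n at hnd
      rcases eq_or_lt_of_le hx with h | h
      · exact absurd ⟨h.symm, hn⟩ hnd
      · omega
    set k := (x + 1).toNat with hkdef
    have hk : 1 ≤ k := by omega
    have hxk : ((k : ℕ) : Int) = x + 1 := by omega
    have hj : ((n.toNat : ℕ) : Int) = n := Int.toNat_of_nonneg (by omega)
    rw [← hxk, ← hj, pv_loopA k hk n.toNat, if_pos (by omega)]
    rw [PySem.Int.powMod_eq_emod _ _ (by positivity)]
    simp only [Int.toNat_natCast]
    by_cases hxn : x + 1 ≤ n
    · have hminn : (min ((k:ℕ) : Int) ((n.toNat : ℕ) : Int)).toNat = k := by omega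
      rw [hminn]
    · -- n < x+1: neither side truncates, both are 2^n
      have hminn : (min ((k:ℕ) : Int) ((n.toNat : ℕ) : Int)).toNat = n.toNat := by omega
      rw [hminn]
      have hj1 : 1 ≤ n.toNat := by omega
      have hlt : (2:Int) ^ n.toNat < 10 ^ n.toNat := by
        have hj1' : n.toNat ≠ 0 := by omega
        exact pow_lt_pow_left₀ (by norm_num) (by norm_num) hj1'
      have hle : (10:Int) ^ n.toNat ≤ 10 ^ k := by
        apply pow_le_pow_right₀ (by norm_num)
        omega
      have h0 : (0:Int) ≤ 2 ^ n.toNat := by positivity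
      rw [Int.emod_eq_of_lt h0 (by omega), Int.emod_eq_of_lt h0 hlt]
  · rw [PySem.List.pyRange_one_eq_nil (by omega), if_neg (by omega)]
    rfl

theorem last_x_digits_2_exp_n_changed : Claim_changed_last_x_digits_2_exp_n := by
  unfold Claim_changed_last_x_digits_2_exp_n; decide

theorem last_x_digits_2_exp_n_tight : Claim_exact_last_x_digits_2_exp_n := by
  intro x n hdom hpre hD
  obtain ⟨hx, hn⟩ := hD
  subst hx
  unfold last_x_digits_2_exp_n last_x_digits_2_exp_n_alt
  have hj : ((n.toNat : ℕ) : Int) = n := Int.toNat_of_nonneg (by omega)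
  have hA : (-1 + 1 : Int) = 0 := by norm_num
  rw [hA, ← hj, pv_loopNeg n.toNat, if_pos (by omega)]
  have hmin : (min (0 : Int) ((n.toNat : ℕ) : Int)).toNat = 0 := by omega
  rw [hmin]
  simp only [Int.toNat_natCast, pow_zero]
  rw [PySem.Int.powMod_eq_emod _ _ (by norm_num), Int.emod_one]
  have : (1:Int) ≤ 2 ^ n.toNat := one_le_pow₀ (by norm_num)
  omega
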